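-- pv_equiv track=rewrite | github.com/RohanDasguptaUW/CheeseHacks2026 | scorer.py | classify_permissions
-- ===== SOURCE A (Python) =====
-- def classify_permissions(permissions):
--     """
--     Takes permissions list
--     Returns detailed classification of each one
--     """
--     permission_details = {
--         "microphone": {
--             "tier": "HIGH",
--             "color": "red",
--             "plain_english": "This app can listen through your microphone",
--             "why_scary": "Can record conversations and background audio even when minimized"
--         },
--         "precise_location": {
--             "tier": "HIGH",
--             "color": "red",
--             "plain_english": "This app knows exactly where you are at all times",
--             "why_scary": "Can map your daily routine, home, workplace, and everywhere you go"
--         },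
--         "camera": {
--             "tier": "HIGH",
--             "color": "red",
--             "plain_english": "This app can access your camera",
--             "why_scary": "Can potentially take photos or video without your knowledge"
--         },
--         "contacts": {
--             "tier": "HIGH",
--             "color": "red",
--             "plain_english": "This app can see everyone in your phone",
--             "why_scary": "Your contacts' data is shared without their knowledge or consent"
--         },
--         "call_logs": {
--             "tier": "HIGH",
--             "color": "red",
--             "plain_english": "This app can see your entire call history",
--             "why_scary": "Knows who you call, when, and for how long"
--         },
--         "background_location": {
--             "tier": "HIGH",
--             "color": "red",
--             "plain_english": "This app tracks your location even when closed",
--             "why_scary": "Builds a complete map of everywhere you go 24/7"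
--         },
--         "approximate_location": {
--             "tier": "MEDIUM",
--             "color": "orange",
--             "plain_english": "This app knows roughly where you are",
--             "why_scary": "Can determine your neighborhood and general area"
--         },
--         "storage": {
--             "tier": "MEDIUM",
--             "color": "orange",
--             "plain_english": "This app can read files on your phone",
--             "why_scary": "Can access photos, documents, and downloads"
--         },
--         "calendar": {
--             "tier": "MEDIUM",
--             "color": "orange",
--             "plain_english": "This app can see your calendar",
--             "why_scary": "Knows your schedule, appointments, and plans"
--         },
--         "sms": {
--             "tier": "MEDIUM",
--             "color": "orange",
--             "plain_english": "This app can read your text messages",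
--             "why_scary": "Can see personal conversations and 2FA codes"
--         }
--     }
--
--     results = []
--     for p in permissions:
--         p_lower = p.lower()
--         if p_lower in permission_details:
--             results.append({
--                 "permission": p,
--                 **permission_details[p_lower]
--             })
--         else:
--             results.append({
--                 "permission": p,
--                 "tier": "LOW",
--                 "color": "green",
--                 "plain_english": f"This app uses {p}",
--                 "why_scary": "Low risk permission"
--             })
--
--     # Sort by risk tier
--     tier_order = {"HIGH": 0, "MEDIUM": 1, "LOW": 2}
--     results.sort(key=lambda x: tier_order[x["tier"]])
--
--     return results
-- ===== SOURCE B (Python) =====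
-- def classify_permissions(permissions):
--     """
--     Takes permissions list
--     Returns detailed classification of each one
--     """
--     permission_details = {
--         "microphone": {
--             "tier": "HIGH",
--             "color": "red",
--             "plain_english": "This app can listen through your microphone",
--             "why_scary": "Can record conversations and background audio even when minimized"
--         },
--         "precise_location": {
--             "tier": "HIGH",
--             "color": "red",
--             "plain_english": "This app knows exactly where you are at all times",
--             "why_scary": "Can map your daily routine, home, workplace, and everywhere you go"
--         },
--         "camera": {
--             "tier": "HIGH",
--             "color": "red",
--             "plain_english": "This app can access your camera",
--             "why_scary": "Can potentially take photos or video without your knowledge"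
--         },
--         "contacts": {
--             "tier": "HIGH",
--             "color": "red",
--             "plain_english": "This app can see everyone in your phone",
--             "why_scary": "Your contacts' data is shared without their knowledge or consent"
--         },
--         "call_logs": {
--             "tier": "HIGH",
--             "color": "red",
--             "plain_english": "This app can see your entire call history",
--             "why_scary": "Knows who you call, when, and for how long"
--         },
--         "background_location": {
--             "tier": "HIGH",
--             "color": "red",
--             "plain_english": "This app tracks your location even when closed",
--             "why_scary": "Builds a complete map of everywhere you go 24/7"
--         },
--         "approximate_location": {
--             "tier": "MEDIUM",
--             "color": "orange",
--             "plain_english": "This app knows roughly where you are",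
--             "why_scary": "Can determine your neighborhood and general area"
--         },
--         "storage": {
--             "tier": "MEDIUM",
--             "color": "orange",
--             "plain_english": "This app can read files on your phone",
--             "why_scary": "Can access photos, documents, and downloads"
--         },
--         "calendar": {
--             "tier": "MEDIUM",
--             "color": "orange",
--             "plain_english": "This app can see your calendar",
--             "why_scary": "Knows your schedule, appointments, and plans"
--         },
--         "sms": {
--             "tier": "MEDIUM",
--             "color": "orange",
--             "plain_english": "This app can read your text messages",
--             "why_scary": "Can see personal conversations and 2FA codes"
--         }
--     }
--
--     # One pass, three tier buckets instead of a comparison sort; appends keep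
--     # input order inside each bucket, so HIGH + MEDIUM + LOW reproduces the
--     # stable sort's output exactly.
--     high, medium, low = [], [], []
--     for p in permissions:
--         info = permission_details.get(p.lower())
--         if info is not None:
--             record = {"permission": p, **info}
--         else:
--             record = {
--                 "permission": p,
--                 "tier": "LOW",
--                 "color": "green",
--                 "plain_english": f"This app uses {p}",
--                 "why_scary": "Low risk permission"
--             }
--         if record["tier"] == "HIGH":
--             high.append(record)
--         elif record["tier"] == "MEDIUM":
--             medium.append(record)
--         else:
--             low.append(record)
--     return high + medium + low
-- ===== Notes on version B (the rewrite author's own statement) =====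
-- stated objective: alternative
-- what changed: Replaces the build-then-comparison-sort (stable sort keyed by tier) with a single pass that appends each record into one of three fixed tier buckets (HIGH/MEDIUM/LOW) and concatenates them, reproducing the stable sort order without sorting.
import Mathlib
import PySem

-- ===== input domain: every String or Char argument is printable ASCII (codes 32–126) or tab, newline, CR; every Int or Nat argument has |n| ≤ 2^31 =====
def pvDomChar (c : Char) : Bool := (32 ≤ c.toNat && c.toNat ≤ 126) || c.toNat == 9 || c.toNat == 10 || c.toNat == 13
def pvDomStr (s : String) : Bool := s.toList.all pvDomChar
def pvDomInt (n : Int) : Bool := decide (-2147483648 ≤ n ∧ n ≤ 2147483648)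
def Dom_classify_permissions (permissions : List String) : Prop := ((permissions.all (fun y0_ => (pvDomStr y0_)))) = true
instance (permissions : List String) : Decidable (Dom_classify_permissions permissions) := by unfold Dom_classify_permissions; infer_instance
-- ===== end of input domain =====

-- B replaces A's build-then-stable-sort-by-tier with a single pass into three fixed
-- tier buckets (HIGH/MEDIUM/LOW) concatenated at the end; same return value.

-- ===== PORT A =====
-- the permission_details dict literal (shared data; both Pythons contain the same literal)
def pvDetails : PySem.Dict String (List (String × String)) :=
  PySem.Dict.mk [ ("microphone",
      [("tier", "HIGH"), ("color", "red"),
       ("plain_english", "This app can listen through your microphone"),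
       ("why_scary", "Can record conversations and background audio even when minimized")]),
    ("precise_location",
      [("tier", "HIGH"), ("color", "red"),
       ("plain_english", "This app knows exactly where you are at all times"),
       ("why_scary", "Can map your daily routine, home, workplace, and everywhere you go")]),
    ("camera",
      [("tier", "HIGH"), ("color", "red"),
       ("plain_english", "This app can access your camera"),
       ("why_scary", "Can potentially take photos or video without your knowledge")]),
    ("contacts",
      [("tier", "HIGH"), ("color", "red"),
       ("plain_english", "This app can see everyone in your phone"),
       ("why_scary", "Your contacts' data is shared without their knowledge or consent")]),
    ("call_logs",
      [("tier", "HIGH"), ("color", "red"),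
       ("plain_english", "This app can see your entire call history"),
       ("why_scary", "Knows who you call, when, and for how long")]),
    ("background_location",
      [("tier", "HIGH"), ("color", "red"),
       ("plain_english", "This app tracks your location even when closed"),
       ("why_scary", "Builds a complete map of everywhere you go 24/7")]),
    ("approximate_location",
      [("tier", "MEDIUM"), ("color", "orange"),
       ("plain_english", "This app knows roughly where you are"),
       ("why_scary", "Can determine your neighborhood and general area")]),
    ("storage",
      [("tier", "MEDIUM"), ("color", "orange"),
       ("plain_english", "This app can read files on your phone"),
       ("why_scary", "Can access photos, documents, and downloads")]),
    ("calendar",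
      [("tier", "MEDIUM"), ("color", "orange"),
       ("plain_english", "This app can see your calendar"),
       ("why_scary", "Knows your schedule, appointments, and plans")]),
    ("sms",
      [("tier", "MEDIUM"), ("color", "orange"),
       ("plain_english", "This app can read your text messages"),
       ("why_scary", "Can see personal conversations and 2FA codes")]) ]

-- tier_order dict of A's sort key
def pvTierOrder : PySem.Dict String Int := PySem.Dict.mk [("HIGH", 0), ("MEDIUM", 1), ("LOW", 2)]

-- A's sort key tier_order[x["tier"]]; every record carries a "tier" key mapped by
-- tier_order, so the defaults of getD are never used on A's actual records.
def pvKeyA (x : List (String × String)) : Int :=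
  PySem.Dict.getD pvTierOrder (PySem.Dict.getD (PySem.Dict.mk x) "tier" "") 0

def classify_permissions (permissions : List String) : List (List (String × String)) :=
  let results := permissions.foldl (fun acc p =>
    let p_lower := PySem.Str.lower p
    match PySem.Dict.get? pvDetails p_lower with
    | some info => acc ++ [("permission", p) :: info]
    | none => acc ++ [[("permission", p), ("tier", "LOW"), ("color", "green"),
        ("plain_english", "This app uses " ++ p), ("why_scary", "Low risk permission")]]) []
  PySem.List.sorted results pvKeyA

-- ===== PORT B =====
-- build one record (the loop body shared by both Pythons, extracted as a helper)
def pvRecord (p : String) : List (String × String) :=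
  match PySem.Dict.get? pvDetails (PySem.Str.lower p) with
  | some info => ("permission", p) :: info
  | none => [("permission", p), ("tier", "LOW"), ("color", "green"),
      ("plain_english", "This app uses " ++ p), ("why_scary", "Low risk permission")]

def classify_permissions_alt (permissions : List String) : List (List (String × String)) :=
  let buckets := permissions.foldl
    (fun (acc : List (List (String × String)) × List (List (String × String)) × List (List (String × String))) p =>
      let r := pvRecord p
      let t := PySem.Dict.getD (PySem.Dict.mk r) "tier" ""
      if t = "HIGH" then (acc.1 ++ [r], acc.2.1, acc.2.2)
      else if t = "MEDIUM" then (acc.1, acc.2.1 ++ [r], acc.2.2)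
      else (acc.1, acc.2.1, acc.2.2 ++ [r]))
    ([], [], [])
  buckets.1 ++ buckets.2.1 ++ buckets.2.2

-- ===== PRECONDITION & SPEC =====
def Spec_classify_permissions (permissions : List String) (out : List (List (String × String))) : Prop := out = classify_permissions_alt permissions
instance (permissions : List String) (out : List (List (String × String))) : Decidable (Spec_classify_permissions permissions out) := by unfold Spec_classify_permissions; infer_instance

-- ===== CLAIM (what is proved, stated in full; the proofs are below) =====
def Claim_equal_classify_permissions : Prop := ∀ (permissions : List String), Dom_classify_permissions permissions → Spec_classify_permissions permissions (classify_permissions permissions)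

-- ===== LEMMAS AND PROOFS =====

def pvTier (x : List (String × String)) : String := PySem.Dict.getD (PySem.Dict.mk x) "tier" ""

def pvCond (a b : List (String × String)) : Bool := decide (pvKeyA a < pvKeyA b)

-- B's loop body, named for the proofs (definitionally the lambda in classify_permissions_alt)
def pvStep (acc : List (List (String × String)) × List (List (String × String)) × List (List (String × String)))
    (p : String) : List (List (String × String)) × List (List (String × String)) × List (List (String × String)) :=
  let r := pvRecord p
  let t := PySem.Dict.getD (PySem.Dict.mk r) "tier" ""
  if t = "HIGH" then (acc.1 ++ [r], acc.2.1, acc.2.2)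
  else if t = "MEDIUM" then (acc.1, acc.2.1 ++ [r], acc.2.2)
  else (acc.1, acc.2.1, acc.2.2 ++ [r])

theorem pvRecord_tier (p : String) :
    pvTier (pvRecord p) = "HIGH" ∨ pvTier (pvRecord p) = "MEDIUM" ∨ pvTier (pvRecord p) = "LOW" := by
  unfold pvRecord
  cases hq : PySem.Dict.get? pvDetails (PySem.Str.lower p) with
  | none => right; right; rfl
  | some info =>
    unfold PySem.Dict.get? at hq
    rcases Option.map_eq_some_iff.mp hq with ⟨q, hfind, hsnd⟩
    have hmem := List.mem_of_find?_eq_some hfind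
    subst hsnd
    simp only [pvDetails] at hmem
    fin_cases hmem <;>
      first
      | (left; rfl)
      | (right; left; rfl)

theorem pvKeyA_of_tier (x : List (String × String)) (t : String) (h : pvTier x = t) :
    pvKeyA x = PySem.Dict.getD pvTierOrder t 0 := by
  unfold pvTier at h
  unfold pvKeyA
  rw [h]

theorem pvFoldA_eq_map (ps : List String) (acc : List (List (String × String))) :
    ps.foldl (fun acc p =>
      let p_lower := PySem.Str.lower p
      match PySem.Dict.get? pvDetails p_lower with
      | some info => acc ++ [("permission", p) :: info]
      | none => acc ++ [[("permission", p), ("tier", "LOW"), ("color", "green"),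
          ("plain_english", "This app uses " ++ p), ("why_scary", "Low risk permission")]]) acc
    = acc ++ ps.map pvRecord := by
  induction ps generalizing acc with
  | nil => simp
  | cons p ps ih =>
    simp only [List.foldl_cons, List.map_cons]
    have hstep : (let p_lower := PySem.Str.lower p
        match PySem.Dict.get? pvDetails p_lower with
        | some info => acc ++ [("permission", p) :: info]
        | none => acc ++ [[("permission", p), ("tier", "LOW"), ("color", "green"),
            ("plain_english", "This app uses " ++ p), ("why_scary", "Low risk permission")]])
        = acc ++ [pvRecord p] := by
      unfold pvRecord
      cases hq : PySem.Dict.get? pvDetails (PySem.Str.lower p) <;> simp [hq]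
    rw [hstep, ih]
    simp

theorem pvInsert_skip (x : List (String × String)) (h rest : List (List (String × String)))
    (hh : ∀ y ∈ h, pvCond x y = false) :
    PySem.List.insertBy pvCond x (h ++ rest) = h ++ PySem.List.insertBy pvCond x rest := by
  induction h with
  | nil => rfl
  | cons y h' ih =>
    have hy : pvCond x y = false := hh y (by simp)
    simp only [List.cons_append, PySem.List.insertBy, hy, Bool.false_eq_true, if_false,
      List.cons.injEq, true_and]
    exact ih (fun z hz => hh z (by simp [hz]))

theorem pvInsert_front (x : List (String × String)) (s : List (List (String × String)))
    (hs : ∀ y ∈ s, pvCond x y = true) :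
    PySem.List.insertBy pvCond x s = x :: s := by
  cases s with
  | nil => rfl
  | cons y s' =>
    have hy : pvCond x y = true := hs y (by simp)
    simp [PySem.List.insertBy, hy]

theorem pvMain (ps : List String) (h m l : List (List (String × String)))
    (Hh : ∀ x ∈ h, pvTier x = "HIGH") (Hm : ∀ x ∈ m, pvTier x = "MEDIUM")
    (Hl : ∀ x ∈ l, pvTier x = "LOW") :
    (ps.map pvRecord).foldl (fun acc x => PySem.List.insertBy pvCond x acc) (h ++ m ++ l)
    = (fun b => b.1 ++ b.2.1 ++ b.2.2) (ps.foldl pvStep (h, m, l)) := by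
  induction ps generalizing h m l with
  | nil => rfl
  | cons p ps ih =>
    simp only [List.map_cons, List.foldl_cons]
    have htier : PySem.Dict.getD (PySem.Dict.mk (pvRecord p)) "tier" "" = pvTier (pvRecord p) := rfl
    rcases pvRecord_tier p with ht | ht | ht
    · -- HIGH: skips h, goes before m ++ l
      have hkey : pvKeyA (pvRecord p) = 0 := pvKeyA_of_tier _ _ ht
      have hins : PySem.List.insertBy pvCond (pvRecord p) (h ++ m ++ l)
          = (h ++ [pvRecord p]) ++ m ++ l := by
        rw [List.append_assoc, pvInsert_skip _ _ _ (fun y hy => by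
          have := pvKeyA_of_tier y _ (Hh y hy)
          simp [pvCond, hkey, this, pvTierOrder, PySem.Dict.getD, PySem.Dict.get?])]
        rw [pvInsert_front _ _ (fun y hy => by
          rcases List.mem_append.mp hy with hy | hy
          · have := pvKeyA_of_tier y _ (Hm y hy)
            simp [pvCond, hkey, this, pvTierOrder, PySem.Dict.getD, PySem.Dict.get?]
          · have := pvKeyA_of_tier y _ (Hl y hy)
            simp [pvCond, hkey, this, pvTierOrder, PySem.Dict.getD, PySem.Dict.get?])]
        simp
      rw [hins]
      rw [show pvStep (h, m, l) p = (h ++ [pvRecord p], m, l) by simp [pvStep, htier, ht]]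
      exact ih (h ++ [pvRecord p]) m l
        (fun z hz => by rcases List.mem_append.mp hz with hz | hz
                        · exact Hh z hz
                        · simp only [List.mem_singleton] at hz; subst hz; exact ht)
        Hm Hl
    · -- MEDIUM: skips h ++ m, goes before l
      have hkey : pvKeyA (pvRecord p) = 1 := pvKeyA_of_tier _ _ ht
      have hins : PySem.List.insertBy pvCond (pvRecord p) (h ++ m ++ l)
          = h ++ (m ++ [pvRecord p]) ++ l := by
        rw [List.append_assoc, List.append_assoc, ← List.append_assoc h m,
          pvInsert_skip _ _ _ (fun y hy => by
            rcases List.mem_append.mp hy with hy | hy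
            · have := pvKeyA_of_tier y _ (Hh y hy)
              simp [pvCond, hkey, this, pvTierOrder, PySem.Dict.getD, PySem.Dict.get?]
            · have := pvKeyA_of_tier y _ (Hm y hy)
              simp [pvCond, hkey, this, pvTierOrder, PySem.Dict.getD, PySem.Dict.get?])]
        rw [pvInsert_front _ _ (fun y hy => by
          have := pvKeyA_of_tier y _ (Hl y hy)
          simp [pvCond, hkey, this, pvTierOrder, PySem.Dict.getD, PySem.Dict.get?])]
        simp
      rw [hins]
      rw [show pvStep (h, m, l) p = (h, m ++ [pvRecord p], l) by simp [pvStep, htier, ht]]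
      exact ih h (m ++ [pvRecord p]) l Hh
        (fun z hz => by rcases List.mem_append.mp hz with hz | hz
                        · exact Hm z hz
                        · simp only [List.mem_singleton] at hz; subst hz; exact ht)
        Hl
    · -- LOW: goes at the very end
      have hkey : pvKeyA (pvRecord p) = 2 := pvKeyA_of_tier _ _ ht
      have hins : PySem.List.insertBy pvCond (pvRecord p) (h ++ m ++ l)
          = h ++ m ++ (l ++ [pvRecord p]) := by
        rw [PySem.List.insertBy_of_forall_not_before _ _ _ (fun y hy => by
          rcases List.mem_append.mp hy with hy | hy
          · rcases List.mem_append.mp hy with hy | hy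
            · have := pvKeyA_of_tier y _ (Hh y hy)
              simp [pvCond, hkey, this, pvTierOrder, PySem.Dict.getD, PySem.Dict.get?]
            · have := pvKeyA_of_tier y _ (Hm y hy)
              simp [pvCond, hkey, this, pvTierOrder, PySem.Dict.getD, PySem.Dict.get?]
          · have := pvKeyA_of_tier y _ (Hl y hy)
            simp [pvCond, hkey, this, pvTierOrder, PySem.Dict.getD, PySem.Dict.get?])]
        simp
      rw [hins]
      rw [show pvStep (h, m, l) p = (h, m, l ++ [pvRecord p]) by simp [pvStep, htier, ht]]
      exact ih h m (l ++ [pvRecord p]) Hh Hm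
        (fun z hz => by rcases List.mem_append.mp hz with hz | hz
                        · exact Hl z hz
                        · simp only [List.mem_singleton] at hz; subst hz; exact ht)

-- ===== VERDICT (by name: the statement is the Claim_ definition above) =====
theorem classify_permissions_spec : Claim_equal_classify_permissions := by
  intro permissions _
  unfold Spec_classify_permissions classify_permissions classify_permissions_alt
  rw [pvFoldA_eq_map, PySem.List.sorted_eq_foldl_insertBy]
  have := pvMain permissions [] [] [] (by simp) (by simp) (by simp)
  simpa [pvCond, pvStep] using this
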